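-- pv_equiv track=rewrite | github.com/ParomitaChel/bengaliocr | ocr.py | SerachString
-- ===== SOURCE A (Python) =====
-- def SerachString(mainmsg, submsg):
--     word_counter = 1
--
--     lines = mainmsg.split("\n")
--     for line_number in range(0, mainmsg.count("\n") + 1):
--         word_counter = 1
--         words = lines[line_number].split(" ")
--         for temp in words:
--             if temp == submsg:
--                 StrSD = "Found At Line:" + str(line_number + 1) + " Word Number:" + str(word_counter)
--                 # return StrSD,mainmsg.replace(submsg,"<font color=" + chr(34) + "red" + chr(34) + ">" + submsg + "</font>")
--                 return StrSD
--             if temp == "|":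
--                 word_counter = word_counter
--             else:
--                 word_counter += 1
--     return "Not Found"
-- ===== SOURCE B (Python) =====
-- def SerachString(mainmsg, submsg):
--     # single character-level scan: no split(), one pass over mainmsg + "\n"
--     line = 1
--     wc = 1
--     buf = ""
--     for ch in mainmsg + "\n":
--         if ch == " " or ch == "\n":
--             if buf == submsg:
--                 return "Found At Line:" + str(line) + " Word Number:" + str(wc)
--             if ch == "\n":
--                 line += 1
--                 wc = 1
--             else:
--                 if buf != "|":
--                     wc += 1
--             buf = ""
--         else:
--             buf += ch
--     return "Not Found"
-- ===== Notes on version B (the rewrite author's own statement) =====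
-- stated objective: alternative
-- what changed: B never calls split: it streams the characters of mainmsg + a sentinel newline through a single state machine (line number, word counter, current-word buffer), emitting/checking a word at each space or newline, where A first splits into lines and then into word lists and runs nested loops over them.
import Mathlib
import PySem

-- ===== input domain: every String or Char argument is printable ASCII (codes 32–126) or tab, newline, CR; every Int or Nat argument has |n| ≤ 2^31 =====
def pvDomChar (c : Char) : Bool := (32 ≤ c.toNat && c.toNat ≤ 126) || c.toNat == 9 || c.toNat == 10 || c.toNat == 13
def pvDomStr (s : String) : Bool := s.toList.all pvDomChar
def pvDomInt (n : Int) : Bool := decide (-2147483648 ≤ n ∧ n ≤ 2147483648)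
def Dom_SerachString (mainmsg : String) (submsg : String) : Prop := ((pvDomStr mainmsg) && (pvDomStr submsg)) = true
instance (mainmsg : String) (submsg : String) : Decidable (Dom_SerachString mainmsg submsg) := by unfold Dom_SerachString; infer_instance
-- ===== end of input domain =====

-- B replaces A's split-based nested loops by a single character-level scan of mainmsg + "\n"
-- (no split at all: a streaming state machine over line number, word counter, word buffer).

-- ===== PORT A =====
-- inner 'for temp in words' loop with early return (Option = returned-or-not), word_counter threaded
def pvAInner (submsg : String) (words : List String) (wc : Int) : Option Int :=
  match words with
  | [] => none
  | w :: ws =>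
    if w = submsg then some wc
    else if w = "|" then pvAInner submsg ws wc
    else pvAInner submsg ws (wc + 1)

-- outer 'for line_number in range(0, mainmsg.count("\n") + 1)' loop: that range is exactly the
-- index set of lines (str.count("\n") + 1 = len(split)), so it is transcribed as the traversal of
-- `lines` carrying line_number
def pvALines (submsg : String) (lines : List String) (ln : Int) : String :=
  match lines with
  | [] => "Not Found"
  | l :: rest =>
    match pvAInner submsg ((PySem.Str.split? l " ").getD []) 1 with
    | some wc => "Found At Line:" ++ PySem.Int.toStr (ln + 1) ++ " Word Number:" ++ PySem.Int.toStr wc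
    | none => pvALines submsg rest (ln + 1)

def SerachString (mainmsg : String) (submsg : String) : String :=
  pvALines submsg ((PySem.Str.split? mainmsg "\n").getD []) 0

-- ===== PORT B =====
-- the 'for ch in mainmsg + "\n"' loop of Source B: state = (line, wc, buf), early return via recursion
def pvBScan (submsg : String) (cs : List Char) (line : Int) (wc : Int) (buf : List Char) : String :=
  match cs with
  | [] => "Not Found"
  | c :: rest =>
    if c = ' ' ∨ c = '\n' then
      if String.ofList buf = submsg then
        "Found At Line:" ++ PySem.Int.toStr line ++ " Word Number:" ++ PySem.Int.toStr wc
      else if c = '\n' then pvBScan submsg rest (line + 1) 1 []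
      else pvBScan submsg rest line (if String.ofList buf = "|" then wc else wc + 1) []
    else pvBScan submsg rest line wc (buf ++ [c])

def SerachString_alt (mainmsg : String) (submsg : String) : String :=
  pvBScan submsg (mainmsg.toList ++ ['\n']) 1 1 []

-- ===== PRECONDITION & SPEC =====
def Spec_SerachString (mainmsg : String) (submsg : String) (out : String) : Prop := out = SerachString_alt mainmsg submsg
instance (mainmsg : String) (submsg : String) (out : String) : Decidable (Spec_SerachString mainmsg submsg out) := by unfold Spec_SerachString; infer_instance

-- ===== CLAIM (what is proved, stated in full; the proofs are below) =====
def Claim_equal_SerachString : Prop := ∀ (mainmsg : String) (submsg : String), Dom_SerachString mainmsg submsg → Spec_SerachString mainmsg submsg (SerachString mainmsg submsg)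

-- ===== LEMMAS AND PROOFS =====

theorem pv_go_single (sep : Char) :
    ∀ (fuel : Nat) (l cur : List Char) (acc : List (List Char)), l.length < fuel →
      PySem.Chars.splitOn.go [sep] fuel l cur acc =
        acc.reverse ++ (List.splitOnP (· == sep) l).modifyHead (cur.reverse ++ ·) := by
  intro fuel
  induction fuel with
  | zero => intro l cur acc h; omega
  | succ fuel ih =>
    intro l cur acc h
    cases l with
    | nil =>
      simp [PySem.Chars.splitOn.go, List.splitOnP_nil]
    | cons a rest =>
      by_cases ha : a = sep
      · subst ha
        have hpre : List.isPrefixOf [a] (a :: rest) = true := by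
          simp [List.isPrefixOf]
        simp only [PySem.Chars.splitOn.go, hpre, if_pos]
        show PySem.Chars.splitOn.go [a] fuel (List.drop [a].length (a :: rest)) [] (cur.reverse :: acc) = _
        simp only [List.length_cons, List.length_nil, List.drop_succ_cons, List.drop_zero]
        rw [ih rest [] ((cur.reverse) :: acc) (by simp at h ⊢; omega)]
        rw [List.splitOnP_cons]
        simp only [beq_self_eq_true, if_pos, List.reverse_cons, List.reverse_nil, List.nil_append, List.modifyHead_cons]
        rw [show (fun x : List Char => x) = id from rfl, List.modifyHead_id]
        simp
      · have hpre : List.isPrefixOf [sep] (a :: rest) = false := by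
          simp [List.isPrefixOf]; exact fun hh => absurd hh.symm ha
        simp only [PySem.Chars.splitOn.go, hpre]
        rw [ih rest (a :: cur) acc (by simp at h ⊢; omega)]
        have hb : (a == sep) = false := by simpa using ha
        rw [List.splitOnP_cons]
        simp only [hb]
        cases hcs : List.splitOnP (· == sep) rest with
        | nil => exact absurd hcs (List.splitOnP_ne_nil _ _)
        | cons x xs => simp

theorem pv_splitOn_single (cs : List Char) (c : Char) :
    PySem.Chars.splitOn cs [c] = List.splitOnP (· == c) cs := by
  unfold PySem.Chars.splitOn
  rw [pv_go_single c (cs.length + 1) cs [] [] (by omega)]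
  simp only [List.reverse_nil, List.nil_append]
  rw [show (fun x : List Char => x) = id from rfl, List.modifyHead_id]
  rfl

theorem pv_splitOnP_pieces (p : Char → Bool) (cs : List Char) :
    ∀ l ∈ List.splitOnP p cs, ∀ a ∈ l, p a = false := by
  induction cs with
  | nil => simp [List.splitOnP_nil]
  | cons c rest ih =>
    rw [List.splitOnP_cons]
    by_cases hc : p c
    · simp only [hc, if_pos]
      intro l hl
      rcases List.mem_cons.mp hl with hl | hl
      · subst hl; simp
      · exact ih l hl
    · simp only [hc, Bool.false_eq_true]
      cases hcs : List.splitOnP p rest with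
      | nil => exact absurd hcs (List.splitOnP_ne_nil _ _)
      | cons x xs =>
        simp only [List.modifyHead_cons]
        intro l hl
        rcases List.mem_cons.mp hl with hl | hl
        · subst hl
          intro a ha
          rcases List.mem_cons.mp ha with ha | ha
          · subst ha; simpa using hc
          · exact ih x (by rw [hcs]; exact List.mem_cons_self) a ha
        · exact ih l (by rw [hcs]; exact List.mem_cons_of_mem _ hl)

theorem pv_mem_splitOnP (p : Char → Bool) (cs : List Char) :
    ∀ w ∈ List.splitOnP p cs, ∀ a ∈ w, a ∈ cs := by
  induction cs with
  | nil => simp [List.splitOnP_nil]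
  | cons c rest ih =>
    rw [List.splitOnP_cons]
    by_cases hc : p c
    · simp only [hc, if_pos]
      intro w hw a ha
      rcases List.mem_cons.mp hw with hw | hw
      · subst hw; simp at ha
      · exact List.mem_cons_of_mem _ (ih w hw a ha)
    · simp only [hc, Bool.false_eq_true]
      cases hcs : List.splitOnP p rest with
      | nil => exact absurd hcs (List.splitOnP_ne_nil _ _)
      | cons x xs =>
        simp only [List.modifyHead_cons]
        intro w hw a ha
        rcases List.mem_cons.mp hw with hw | hw
        · subst hw
          rcases List.mem_cons.mp ha with ha | ha
          · subst ha; exact List.mem_cons_self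
          · exact List.mem_cons_of_mem _ (ih x (by rw [hcs]; exact List.mem_cons_self) a ha)
        · exact List.mem_cons_of_mem _ (ih w (by rw [hcs]; exact List.mem_cons_of_mem _ hw) a ha)

theorem pv_flatten_lines (cs : List Char) :
    cs ++ ['\n'] = ((List.splitOnP (· == '\n') cs).map (· ++ ['\n'])).flatten := by
  induction cs with
  | nil => simp [List.splitOnP_nil]
  | cons c rest ih =>
    rw [List.splitOnP_cons]
    by_cases hc : c = '\n'
    · subst hc
      simp only [beq_self_eq_true, if_pos, List.map_cons, List.flatten_cons, List.nil_append]
      simpa using ih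
    · have hb : (c == '\n') = false := by simpa using hc
      simp only [hb, Bool.false_eq_true]
      cases hcs : List.splitOnP (· == '\n') rest with
      | nil => exact absurd hcs (List.splitOnP_ne_nil _ _)
      | cons x xs =>
        rw [hcs] at ih
        simp only [List.map_cons, List.flatten_cons] at ih
        simp [List.cons_append, ih]

theorem pv_split?_single (t : String) (c : Char) (sep : String) (hsep : sep.toList = [c]) :
    (PySem.Str.split? t sep).getD [] = (List.splitOnP (· == c) t.toList).map String.ofList := by
  have h := PySem.Str.split?_map t sep
  rw [hsep] at h
  have h2 : PySem.Chars.split? t.toList [c] = some (List.splitOnP (· == c) t.toList) := by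
    simp [PySem.Chars.split?, pv_splitOn_single]
  rw [h2] at h
  cases hs : PySem.Str.split? t sep with
  | none => rw [hs] at h; simp at h
  | some lst =>
    rw [hs] at h
    simp only [Option.map_some, Option.some.injEq] at h
    have hl : lst = (List.splitOnP (· == c) t.toList).map String.ofList := by
      rw [← h, List.map_map]
      apply (List.map_id _).symm.trans
      apply List.map_congr_left
      intro x _
      exact (String.ofList_toList).symm
    simp [hl]

theorem pv_scan_chunk (s : String) (w : List Char) (hw : ∀ a ∈ w, a ≠ ' ' ∧ a ≠ '\n') :
    ∀ (cs : List Char) (ln wc : Int) (buf : List Char),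
      pvBScan s (w ++ cs) ln wc buf = pvBScan s cs ln wc (buf ++ w) := by
  induction w with
  | nil => intro cs ln wc buf; simp
  | cons a w ih =>
    intro cs ln wc buf
    have ha := hw a List.mem_cons_self
    have hcond : ¬ (a = ' ' ∨ a = '\n') := by tauto
    simp only [List.cons_append, pvBScan, if_neg hcond]
    rw [ih (fun b hb => hw b (List.mem_cons_of_mem _ hb)) cs ln wc (buf ++ [a])]
    simp

theorem pv_scan_line (s : String) :
    ∀ (ws : List (List Char)), ws ≠ [] → (∀ w ∈ ws, ∀ a ∈ w, a ≠ ' ' ∧ a ≠ '\n') →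
      ∀ (cs : List Char) (ln wc : Int),
        pvBScan s ((List.intercalate [' '] ws) ++ '\n' :: cs) ln wc [] =
          match pvAInner s (ws.map String.ofList) wc with
          | some w => "Found At Line:" ++ PySem.Int.toStr ln ++ " Word Number:" ++ PySem.Int.toStr w
          | none => pvBScan s cs (ln + 1) 1 [] := by
  intro ws
  induction ws with
  | nil => intro h; exact absurd rfl h
  | cons w tail ih =>
    intro _ hws cs ln wc
    cases tail with
    | nil =>
      rw [show List.intercalate [' '] [w] = w by simp [List.intercalate]]
      rw [pv_scan_chunk s w (hws w List.mem_cons_self) ('\n' :: cs) ln wc []]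
      simp only [pvBScan, List.nil_append]
      by_cases hm : String.ofList w = s
      · simp [pvAInner, hm]
      · simp [pvAInner, hm]
    | cons w2 tail2 =>
      have hint : List.intercalate [' '] (w :: w2 :: tail2) =
          w ++ ' ' :: List.intercalate [' '] (w2 :: tail2) := by
        simp [List.intercalate, List.intersperse]
      rw [hint, List.append_assoc]
      rw [pv_scan_chunk s w (hws w List.mem_cons_self) _ ln wc []]
      simp only [List.nil_append, List.cons_append, pvBScan]
      by_cases hm : String.ofList w = s
      · simp [pvAInner, hm]
      · rw [if_neg hm, if_pos (show True ∨ ' ' = '\n' from Or.inl trivial),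
           if_neg (show ¬ (' ' = '\n') by decide)]
        rw [ih (by simp) (fun x hx => hws x (List.mem_cons_of_mem _ hx)) cs ln _]
        by_cases hp : String.ofList w = "|"
        · have hps : ¬ ("|" = s) := hp ▸ hm
          simp [pvAInner, hp, hps]
        · simp [pvAInner, hm, hp]

theorem pv_scan_lines (s : String) :
    ∀ (lines : List (List Char)), (∀ l ∈ lines, '\n' ∉ l) → ∀ (ln : Int),
      pvBScan s ((lines.map (· ++ ['\n'])).flatten) (ln + 1) 1 [] =
        pvALines s (lines.map String.ofList) ln := by
  intro lines
  induction lines with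
  | nil => intro _ ln; simp [pvBScan, pvALines]
  | cons l rest ih =>
    intro hl ln
    have hlnl : '\n' ∉ l := hl l List.mem_cons_self
    have hwords : ∀ w ∈ List.splitOnP (· == ' ') l, ∀ a ∈ w, a ≠ ' ' ∧ a ≠ '\n' := by
      intro w hw a ha
      constructor
      · have := pv_splitOnP_pieces (· == ' ') l w hw a ha
        simpa using this
      · intro hEq
        exact hlnl (hEq ▸ pv_mem_splitOnP (· == ' ') l w hw a ha)
    have hinter : List.intercalate [' '] (List.splitOnP (· == ' ') l) = l :=
      List.intercalate_splitOn l ' '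
    simp only [List.map_cons, List.flatten_cons, List.append_assoc, List.singleton_append]
    simp only [pvALines]
    rw [pv_split?_single (String.ofList l) ' ' " " rfl, String.toList_ofList]
    conv_lhs => rw [← hinter]
    rw [pv_scan_line s (List.splitOnP (· == ' ') l) (List.splitOnP_ne_nil _ _) hwords]
    cases pvAInner s ((List.splitOnP (· == ' ') l).map String.ofList) 1 with
    | some wc => simp
    | none =>
      simp only
      exact ih (fun x hx => hl x (List.mem_cons_of_mem _ hx)) (ln + 1)

-- ===== VERDICT (by name: the statement is the Claim_ definition above) =====
theorem SerachString_spec : Claim_equal_SerachString := by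
  intro m s _
  unfold Spec_SerachString SerachString SerachString_alt
  rw [pv_split?_single m '\n' "\n" rfl]
  rw [pv_flatten_lines m.toList]
  have h := pv_scan_lines s (List.splitOnP (· == '\n') m.toList)
    (fun l hl hmem => by simpa using pv_splitOnP_pieces (· == '\n') m.toList l hl '\n' hmem) 0
  norm_num at h
  exact h.symm
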